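-- pv_equiv track=rewrite | github.com/IsolatedRain/code_wars | completed/Balance the parentheses.py | fix_parentheses
-- ===== SOURCE A (Python) =====
-- def fix_parentheses(s):
--     stack = []
--     R = ""
--     for i, c in enumerate(s):
--         if c == "(":
--             stack.append(")")
--         else:
--             if not stack:
--                 R += "("
--             else:
--                 stack.pop()
--     L = len(stack) * ")"
--     return R + s + L
-- ===== SOURCE B (Python) =====
-- def fix_parentheses(s):
--     # Cancellation algorithm: map every char to a paren ('(' stays, anything
--     # else acts as ')'), then repeatedly delete matched "()" pairs; the
--     # irreducible remainder is ")"*a + "("*b, so prepend a '(' and append b ')'.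
--     t = "".join("(" if c == "(" else ")" for c in s)
--     while "()" in t:
--         t = t.replace("()", "")
--     return "(" * t.count(")") + s + ")" * t.count("(")
-- ===== Notes on version B (the rewrite author's own statement) =====
-- stated objective: alternative
-- what changed: Replaces the stack simulation with a string-rewriting (cancellation) algorithm: every char is normalised to a paren, matched "()" pairs are repeatedly deleted, and the irreducible remainder ")"*a+"("*b directly yields both paddings.
import Mathlib
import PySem

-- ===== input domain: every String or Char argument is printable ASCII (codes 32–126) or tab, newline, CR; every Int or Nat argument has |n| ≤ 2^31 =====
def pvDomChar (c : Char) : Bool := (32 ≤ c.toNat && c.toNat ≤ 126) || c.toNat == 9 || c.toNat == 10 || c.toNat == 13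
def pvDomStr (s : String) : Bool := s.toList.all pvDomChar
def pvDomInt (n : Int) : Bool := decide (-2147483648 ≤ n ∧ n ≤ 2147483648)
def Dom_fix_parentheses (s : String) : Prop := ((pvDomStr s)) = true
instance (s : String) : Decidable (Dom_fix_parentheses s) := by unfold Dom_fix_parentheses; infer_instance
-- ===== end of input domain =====

-- B replaces A's stack simulation with a cancellation algorithm (normalise chars to parens, repeatedly delete "()" pairs, read both paddings off the irreducible remainder); same return value.


-- ===== PORT A =====
-- A's loop state: (stack of ")" chars, accumulated prefix R); stack.pop() removes the last element.
def pvAStep (p : List Char × List Char) (c : Char) : List Char × List Char :=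
  if c = '(' then (')' :: p.1, p.2)
  else if p.1 = [] then (p.1, p.2 ++ ['('])
  else (p.1.tail, p.2)

def fix_parentheses (s : String) : String :=
  let st := s.toList.foldl pvAStep ([], [])
  String.mk (st.2 ++ s.toList ++ List.replicate st.1.length ')')

-- ===== PORT B =====
-- normalisation: '(' stays '(', every other char acts as ')'
def pvNormChar (c : Char) : Char := if c = '(' then '(' else ')'

-- one t.replace("()", "") pass: delete non-overlapping "()" pairs left to right
def pvRemoveAll : List Char → List Char
  | [] => []
  | [c] => [c]
  | c1 :: c2 :: rest =>
    if c1 = '(' then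
      if c2 = ')' then pvRemoveAll rest
      else c1 :: pvRemoveAll (c2 :: rest)
    else c1 :: pvRemoveAll (c2 :: rest)

-- '"()" in t'
def pvHasPair : List Char → Bool
  | [] => false
  | [_] => false
  | c1 :: c2 :: rest => (c1 = '(' && c2 = ')') || pvHasPair (c2 :: rest)

theorem pvRemoveAll_length_le (t : List Char) :
    (pvRemoveAll t).length ≤ t.length := by
  induction t using pvRemoveAll.induct with
  | case1 => simp [pvRemoveAll]
  | case2 c => simp [pvRemoveAll]
  | case3 rest ih => simp [pvRemoveAll]; omega
  | case4 c2 rest h2 ih => simp [pvRemoveAll, h2] at ih ⊢; omega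
  | case5 c1 c2 rest h1 ih => simp [pvRemoveAll, h1] at ih ⊢; omega

-- termination of the while loop: a replace pass shrinks t when "()" occurs
theorem pvRemoveAll_length_lt (t : List Char) (h : pvHasPair t = true) :
    (pvRemoveAll t).length < t.length := by
  induction t using pvRemoveAll.induct with
  | case1 => simp [pvHasPair] at h
  | case2 c => simp [pvHasPair] at h
  | case3 rest ih =>
    have := pvRemoveAll_length_le rest
    simp only [pvRemoveAll]; simp; omega
  | case4 c2 rest h2 ih =>
    simp only [pvHasPair, Bool.or_eq_true, Bool.and_eq_true, decide_eq_true_eq] at h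
    have hh : pvHasPair (c2 :: rest) = true := by
      rcases h with ⟨_, h⟩ | h
      · exact absurd ‹c2 = ')'› h2
      · exact h
    have := ih hh
    simp at this
    simp [pvRemoveAll, h2]; omega
  | case5 c1 c2 rest h1 ih =>
    simp only [pvHasPair, Bool.or_eq_true, Bool.and_eq_true, decide_eq_true_eq] at h
    have hh : pvHasPair (c2 :: rest) = true := by
      rcases h with ⟨h, _⟩ | h
      · exact absurd h h1
      · exact h
    have := ih hh
    simp at this
    simp [pvRemoveAll, h1]; omega

-- 'while "()" in t: t = t.replace("()", "")'
def pvReduce (t : List Char) : List Char :=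
  if h : pvHasPair t = true then pvReduce (pvRemoveAll t) else t
termination_by t.length
decreasing_by exact pvRemoveAll_length_lt t h

def fix_parentheses_alt (s : String) : String :=
  let t := pvReduce (s.toList.map pvNormChar)
  String.mk (List.replicate (t.count ')') '(' ++ s.toList ++ List.replicate (t.count '(') ')')

-- ===== PRECONDITION & SPEC =====
def Spec_fix_parentheses (s : String) (out : String) : Prop := out = fix_parentheses_alt s
instance (s : String) (out : String) : Decidable (Spec_fix_parentheses s out) := by unfold Spec_fix_parentheses; infer_instance

-- ===== CLAIM (what is proved, stated in full; the proofs are below) =====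
def Claim_equal_fix_parentheses : Prop := ∀ (s : String), Dom_fix_parentheses s → Spec_fix_parentheses s (fix_parentheses s)

-- ===== LEMMAS AND PROOFS =====

-- pvAStep only looks at whether c = '(' (so normalisation doesn't change A's fold)
theorem pvAStep_norm (p : List Char × List Char) (c : Char) :
    pvAStep p (pvNormChar c) = pvAStep p c := by
  by_cases h : c = '(' <;> simp [pvAStep, pvNormChar, h]

theorem foldl_norm (l : List Char) (p : List Char × List Char) :
    (l.map pvNormChar).foldl pvAStep p = l.foldl pvAStep p := by
  induction l generalizing p with
  | nil => rfl
  | cons c tl ih => simp [List.foldl_cons, pvAStep_norm, ih]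

-- a "()" pair is a no-op for A's fold
theorem pvAStep_pair (p : List Char × List Char) :
    pvAStep (pvAStep p '(') ')' = p := by
  simp [pvAStep]

theorem foldl_removeAll (t : List Char) (p : List Char × List Char) :
    (pvRemoveAll t).foldl pvAStep p = t.foldl pvAStep p := by
  induction t using pvRemoveAll.induct generalizing p with
  | case1 => rfl
  | case2 c => rfl
  | case3 rest ih =>
    simp [pvRemoveAll, List.foldl_cons, ih, pvAStep_pair]
  | case4 c2 rest h2 ih =>
    simp [pvRemoveAll, h2, List.foldl_cons, ih]
  | case5 c1 c2 rest h1 ih =>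
    simp [pvRemoveAll, h1, List.foldl_cons, ih]

theorem foldl_reduce (t : List Char) (p : List Char × List Char) :
    (pvReduce t).foldl pvAStep p = t.foldl pvAStep p := by
  induction t using pvReduce.induct generalizing p with
  | case1 t h ih => rw [pvReduce, dif_pos h, ih, foldl_removeAll]
  | case2 t h => rw [pvReduce, dif_neg h]

theorem pvReduce_noPair (t : List Char) : pvHasPair (pvReduce t) = false := by
  induction t using pvReduce.induct with
  | case1 t h ih => rw [pvReduce, dif_pos h]; exact ih
  | case2 t h => rw [pvReduce, dif_neg h]; simpa using h

-- chars stay parens through a replace pass / the whole reduction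
theorem pvRemoveAll_parens (t : List Char) (h : ∀ c ∈ t, c = '(' ∨ c = ')') :
    ∀ c ∈ pvRemoveAll t, c = '(' ∨ c = ')' := by
  induction t using pvRemoveAll.induct with
  | case1 => simpa [pvRemoveAll] using h
  | case2 c => simpa [pvRemoveAll] using h
  | case3 rest ih =>
    simp only [pvRemoveAll, if_true, if_pos rfl]
    exact ih fun c hc => h c (by simp [hc])
  | case4 c2 rest h2 ih =>
    simp only [pvRemoveAll, if_true, if_pos rfl, if_neg h2]
    intro c hc
    rcases List.mem_cons.mp hc with hc | hc
    · exact hc ▸ h '(' (by simp)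
    · exact ih (fun d hd => h d (List.mem_cons_of_mem _ hd)) c hc
  | case5 c1 c2 rest h1 ih =>
    simp only [pvRemoveAll, if_neg h1]
    intro c hc
    rcases List.mem_cons.mp hc with hc | hc
    · exact hc ▸ h c1 (by simp)
    · exact ih (fun d hd => h d (List.mem_cons_of_mem _ hd)) c hc

theorem pvReduce_parens (t : List Char) (h : ∀ c ∈ t, c = '(' ∨ c = ')') :
    ∀ c ∈ pvReduce t, c = '(' ∨ c = ')' := by
  induction t using pvReduce.induct with
  | case1 t h0 ih => rw [pvReduce, dif_pos h0]; exact ih (pvRemoveAll_parens t h)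
  | case2 t h0 => rw [pvReduce, dif_neg h0]; exact h

-- an irreducible paren string is ")"^a ++ "("^b, with a, b its counts
theorem irreducible_shape (t : List Char) (hp : ∀ c ∈ t, c = '(' ∨ c = ')')
    (hn : pvHasPair t = false) :
    t = List.replicate (t.count ')') ')' ++ List.replicate (t.count '(') '(' := by
  induction t with
  | nil => simp
  | cons c rest ih =>
    have hrest : pvHasPair rest = false := by
      cases rest with
      | nil => rfl
      | cons d r =>
        simp only [pvHasPair, Bool.or_eq_false_iff] at hn
        exact hn.2
    have hrp : ∀ d ∈ rest, d = '(' ∨ d = ')' := fun d hd => hp d (by simp [hd])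
    have hshape := ih hrp hrest
    rcases hp c (by simp) with hc | hc
    · subst hc
      -- rest cannot start with ')', so rest.count ')' = 0
      have ha : rest.count ')' = 0 := by
        by_contra hne
        have : ∃ r', rest = ')' :: r' := by
          rcases Nat.exists_eq_succ_of_ne_zero hne with ⟨k, hk⟩
          rw [hshape, hk]
          exact ⟨_, rfl⟩
        rcases this with ⟨r', hr⟩
        rw [hr] at hn
        simp [pvHasPair] at hn
      conv_lhs => rw [hshape]
      simp [List.count_cons, ha, List.replicate_succ, List.count_replicate]
    · subst hc
      conv_lhs => rw [hshape]
      simp [List.count_cons, List.replicate_succ]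

-- A's fold over ")"^a: stack stays empty, R gains a '('s
theorem foldl_close (a : ℕ) (R : List Char) :
    (List.replicate a ')').foldl pvAStep ([], R) = ([], R ++ List.replicate a '(') := by
  induction a generalizing R with
  | zero => simp
  | succ n ih =>
    rw [List.replicate_succ, List.foldl_cons]
    have hstep : pvAStep ([], R) ')' = ([], R ++ ['(']) := by
      simp [pvAStep]
    rw [hstep, ih]
    simp [List.replicate_succ]

-- A's fold over "("^b: pushes b ')'s
theorem foldl_open (b : ℕ) (st R : List Char) :
    (List.replicate b '(').foldl pvAStep (st, R) = (List.replicate b ')' ++ st, R) := by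
  induction b generalizing st with
  | zero => simp
  | succ n ih =>
    rw [List.replicate_succ, List.foldl_cons]
    have hstep : pvAStep (st, R) '(' = (')' :: st, R) := by
      simp [pvAStep]
    rw [hstep, ih]
    simp [List.replicate_succ']

-- ===== VERDICT (by name: the statement is the Claim_ definition above) =====
theorem fix_parentheses_spec : Claim_equal_fix_parentheses := by
  intro s _
  unfold Spec_fix_parentheses
  have hparens : ∀ c ∈ s.toList.map pvNormChar, c = '(' ∨ c = ')' := by
    intro c hc
    rcases List.mem_map.mp hc with ⟨d, _, rfl⟩
    by_cases h : d = '(' <;> simp [pvNormChar, h]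
  set t := pvReduce (s.toList.map pvNormChar) with ht
  have hshape : t = List.replicate (t.count ')') ')' ++ List.replicate (t.count '(') '(' :=
    irreducible_shape t (pvReduce_parens _ hparens) (pvReduce_noPair _)
  have hfold : s.toList.foldl pvAStep ([], []) =
      (List.replicate (t.count '(') ')', List.replicate (t.count ')') '(') := by
    rw [← foldl_norm, ← foldl_reduce (s.toList.map pvNormChar), ← ht]
    conv_lhs => rw [hshape]
    rw [List.foldl_append, foldl_close, foldl_open]
    simp
  show fix_parentheses s = fix_parentheses_alt s
  simp only [fix_parentheses, fix_parentheses_alt, ← ht, hfold]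
  simp
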